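-- pv_equiv track=rewrite | github.com/alexandraback/datacollection | solutions_5636311922769920_0/Python/oonishi/d.py | solve
-- ===== SOURCE A (Python) =====
-- def solve(K,C,S):
-- 	ans = []
-- 	#used = [0]*K
-- 	c = C
-- 	n = 0
-- 	k = 0
-- 	for s in range(S):
-- 		n = 0
-- 		for c in range(C):
-- 			n = n*K + k
-- 			k += 1
-- 			if k == K:
-- 				break
-- 		ans += [n+1]
-- 		if k == K:
-- 			return ans
--
--
-- 	return []
-- ===== SOURCE B (Python) =====
-- def solve(K, C, S):
--     if K <= 0 or C <= 0:
--         return []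
--     groups = -(-K // C)          # ceil(K/C)
--     if S < groups:
--         return []
--     # closed form for the Horner value of the consecutive digits a, a+1, ..., a+L-1:
--     #   sum_{t<L} (a+t)*K^(L-1-t) = a*(K^L-1)/(K-1) + (K^L - L*(K-1) - 1)/(K-1)^2
--     def val(a, L):
--         if K == 1:
--             return 0
--         p = (K ** L - 1) // (K - 1)
--         q = (K ** L - L * (K - 1) - 1) // ((K - 1) ** 2)
--         return a * p + q
--     res = [val(i * C, C) + 1 for i in range(groups - 1)]
--     res.append(val((groups - 1) * C, K - (groups - 1) * C) + 1)
--     return res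
-- ===== Notes on version B (the rewrite author's own statement) =====
-- stated objective: faster
-- what changed: B eliminates the per-digit loop entirely: it computes ceil(K/C) groups in closed form and evaluates each group's value with the arithmetic formula a*(K^L-1)//(K-1) + (K^L-L*(K-1)-1)//(K-1)^2 for the Horner sum of the consecutive digits a..a+L-1, instead of A's range(S) loop threading a global digit counter with break and two k==K checks; the per-group work becomes O(1) big-int operations instead of L multiply-add steps.
-- intended difference: On the degenerate inputs K=0, C<=0, S>=1 A returns [1] because its never-run inner loop leaves k==0==K so the stale check fires after appending n+1; B returns [], the intended value since there are no code numbers to encode when K=0. — e.g. on solve(0, 0, 1): A returns [1], B returns []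
import Mathlib
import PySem

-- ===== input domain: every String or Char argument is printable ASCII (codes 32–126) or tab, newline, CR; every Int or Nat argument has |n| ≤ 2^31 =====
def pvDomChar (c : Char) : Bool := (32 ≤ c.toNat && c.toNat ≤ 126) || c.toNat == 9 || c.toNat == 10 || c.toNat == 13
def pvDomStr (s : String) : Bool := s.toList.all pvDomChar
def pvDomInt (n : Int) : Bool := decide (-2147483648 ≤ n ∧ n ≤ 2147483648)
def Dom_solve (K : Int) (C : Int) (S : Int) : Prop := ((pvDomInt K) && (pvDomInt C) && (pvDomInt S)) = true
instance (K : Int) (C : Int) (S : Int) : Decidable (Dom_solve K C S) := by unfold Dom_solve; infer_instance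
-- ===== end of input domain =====

-- B computes ceil(K/C) groups and evaluates each group's value by a closed-form formula for
-- the Horner sum of a run of consecutive digits, removing A's digit loop; return value only.

-- ===== PORT A =====
-- inner 'for c in range(C)' loop: state (n, k), breaks when k reaches K
def innerA (K : Int) : Nat → Int → Int → Int × Int
  | 0, n, k => (n, k)
  | c + 1, n, k =>
      let n' := n * K + k
      let k' := k + 1
      if k' = K then (n', k') else innerA K c n' k'

-- outer 'for s in range(S)' loop with early return when k == K
def outerA (K : Int) (C : Int) : Nat → Int → List Int → List Int
  | 0, _, _ => []
  | s + 1, k, ans =>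
      let p := innerA K C.toNat 0 k
      let ans' := ans ++ [p.1 + 1]
      if p.2 = K then ans' else outerA K C s p.2 ans'

def solve (K : Int) (C : Int) (S : Int) : List Int :=
  outerA K C S.toNat 0 []

-- ===== PORT B =====
-- Source B's local 'val(a, L)': closed-form value of the Horner fold of digits a..a+L-1
def valB (K : Int) (a : Int) (L : Int) : Int :=
  if K = 1 then 0
  else
    let p := PySem.Int.floordiv (K ^ L.toNat - 1) (K - 1)
    let q := PySem.Int.floordiv (K ^ L.toNat - L * (K - 1) - 1) ((K - 1) ^ 2)
    a * p + q

def solve_alt (K : Int) (C : Int) (S : Int) : List Int :=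
  if K ≤ 0 ∨ C ≤ 0 then []
  else
    let groups := -(PySem.Int.floordiv (-K) C)
    if S < groups then []
    else
      ((PySem.List.pyRange 0 (groups - 1) 1).map (fun i => valB K (i * C) C + 1))
        ++ [valB K ((groups - 1) * C) (K - (groups - 1) * C) + 1]

-- ===== PRECONDITION & SPEC =====
-- On the degenerate inputs K=0, C<=0, S>=1 A returns [1] because its never-run inner loop
-- leaves k==0==K so the stale check fires after appending n+1; B returns [], the intended
-- value since there are no code numbers to encode when K=0.
def D_solve (K : Int) (C : Int) (S : Int) : Prop := K = 0 ∧ C ≤ 0 ∧ 1 ≤ S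
instance (K : Int) (C : Int) (S : Int) : Decidable (D_solve K C S) := by unfold D_solve; infer_instance

def Spec_solve (K : Int) (C : Int) (S : Int) (out : List Int) : Prop :=
  ¬ D_solve K C S → out = solve_alt K C S
instance (K : Int) (C : Int) (S : Int) (out : List Int) : Decidable (Spec_solve K C S out) := by unfold Spec_solve; infer_instance

def pvDiffWitness_solve : Int × Int × Int := (0, 0, 1)
def pvDiffWitnessOut_solve : (List Int) × (List Int) := ([1], [])

-- ===== CLAIM (what is proved, stated in full; the proofs are below) =====
def Claim_unchanged_solve : Prop := ∀ (K : Int) (C : Int) (S : Int), Dom_solve K C S → Spec_solve K C S (solve K C S)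
def Claim_changed_solve : Prop := Dom_solve (pvDiffWitness_solve.1) (pvDiffWitness_solve.2.1) (pvDiffWitness_solve.2.2) ∧ D_solve (pvDiffWitness_solve.1) (pvDiffWitness_solve.2.1) (pvDiffWitness_solve.2.2) ∧ solve (pvDiffWitness_solve.1) (pvDiffWitness_solve.2.1) (pvDiffWitness_solve.2.2) = pvDiffWitnessOut_solve.1 ∧ solve_alt (pvDiffWitness_solve.1) (pvDiffWitness_solve.2.1) (pvDiffWitness_solve.2.2) = pvDiffWitnessOut_solve.2 ∧ pvDiffWitnessOut_solve.1 ≠ pvDiffWitnessOut_solve.2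
def Claim_exact_solve : Prop := ∀ (K : Int) (C : Int) (S : Int), Dom_solve K C S → D_solve K C S → solve K C S ≠ solve_alt K C S

-- ===== LEMMAS AND PROOFS =====

-- the i-th group value appearing in A's characterisation, and the group count
def groupVal (K : Int) (C : Int) (i : Int) : Int :=
  (PySem.List.pyRange (i * C) (min ((i + 1) * C) K) 1).foldl (fun n d => n * K + d) 0 + 1

def grp (K : Int) (C : Int) : Int := -(PySem.Int.floordiv (-K) C)

-- (K^L - 1)/(K - 1) and sum_{t<L} t*K^(L-1-t), defined by their Horner recurrences
def Gp (K : Int) : Nat → Int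
  | 0 => 0
  | L + 1 => Gp K L * K + 1

def Hp (K : Int) : Nat → Int
  | 0 => 0
  | L + 1 => Hp K L * K + L

lemma pyRange_one_nil (a b : Int) (h : b ≤ a) : PySem.List.pyRange a b 1 = [] := by
  simp [PySem.List.pyRange]; omega

lemma Gp_mul (K : Int) (L : Nat) : (K - 1) * Gp K L = K ^ L - 1 := by
  induction L with
  | zero => simp [Gp]
  | succ L ih => simp only [Gp]; linear_combination K * ih

lemma Gp_eq_Hp (K : Int) (L : Nat) : Gp K L = (K - 1) * Hp K L + L := by
  induction L with
  | zero => simp [Gp, Hp]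
  | succ L ih => simp only [Gp, Hp]; push_cast; linear_combination K * ih

lemma fold_shift (K : Int) : ∀ (L : Nat) (a n : Int),
    (PySem.List.pyRange a (a + L) 1).foldl (fun n d => n * K + d) n
      = n * K ^ L + (PySem.List.pyRange a (a + L) 1).foldl (fun n d => n * K + d) 0 := by
  intro L
  induction L with
  | zero =>
      intro a n
      rw [pyRange_one_nil a (a + ((0:Nat):Int)) (by push_cast; omega)]
      simp
  | succ L ih =>
      intro a n
      have hend : a + ((L + 1 : Nat) : Int) = (a + 1) + (L : Int) := by push_cast; ring
      rw [hend, PySem.List.pyRange_one_cons (by omega : a < (a + 1) + (L : Int))]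
      simp only [List.foldl_cons]
      rw [ih (a + 1) (n * K + a), ih (a + 1) (0 * K + a)]
      ring

lemma fold_closed (K : Int) : ∀ (L : Nat) (a : Int),
    (PySem.List.pyRange a (a + L) 1).foldl (fun n d => n * K + d) 0
      = a * Gp K L + Hp K L := by
  intro L
  induction L with
  | zero =>
      intro a
      rw [pyRange_one_nil a (a + ((0:Nat):Int)) (by push_cast; omega)]
      simp [Gp, Hp]
  | succ L ih =>
      intro a
      have hend : a + ((L + 1 : Nat) : Int) = (a + 1) + (L : Int) := by push_cast; ring
      rw [hend, PySem.List.pyRange_one_cons (by omega : a < (a + 1) + (L : Int))]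
      simp only [List.foldl_cons]
      rw [fold_shift K L (a + 1) (0 * K + a), ih (a + 1)]
      simp only [Gp, Hp]
      linear_combination (-a) * Gp_mul K L + Gp_eq_Hp K L

lemma valB_eq (K : Int) (hK : 2 ≤ K) (a : Int) (L : Nat) :
    valB K a (L : Int) = a * Gp K L + Hp K L := by
  have h1 : 0 < K - 1 := by omega
  have hg := Gp_mul K L
  have hh := Gp_eq_Hp K L
  have hp : PySem.Int.floordiv (K ^ ((L : Int)).toNat - 1) (K - 1) = Gp K L := by
    rw [Int.toNat_natCast]
    exact (PySem.Int.floordiv_eq_iff_of_pos h1).mpr ⟨by nlinarith, by nlinarith⟩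
  have hq : PySem.Int.floordiv (K ^ ((L : Int)).toNat - (L : Int) * (K - 1) - 1) ((K - 1) ^ 2)
      = Hp K L := by
    rw [Int.toNat_natCast]
    have h2 : 0 < (K - 1) ^ 2 := by positivity
    exact (PySem.Int.floordiv_eq_iff_of_pos h2).mpr ⟨by nlinarith, by nlinarith⟩
  simp only [valB, if_neg (show ¬ K = 1 by omega)]
  rw [hp, hq]

lemma inner_spec (K : Int) (_hK : 1 ≤ K) :
    ∀ (c : Nat) (n k : Int), 0 ≤ k → k < K →
      innerA K c n k =
        ((PySem.List.pyRange k (min (k + c) K) 1).foldl (fun n d => n * K + d) n,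
          min (k + (c : Int)) K) := by
  intro c
  induction c with
  | zero =>
      intro n k hk0 hkK
      have hmin : min (k + ((0:Nat):Int)) K = k := by push_cast; omega
      rw [hmin]
      simp [innerA, pyRange_one_nil k k le_rfl]
  | succ c ih =>
      intro n k hk0 hkK
      simp only [innerA]
      by_cases hb : k + 1 = K
      · rw [if_pos hb]
        have hmin : min (k + ((c+1:Nat):Int)) K = K := by push_cast; omega
        rw [hmin]
        rw [PySem.List.pyRange_one_cons hkK, show k + 1 = K from hb,
            pyRange_one_nil K K le_rfl]
        simp
      · rw [if_neg hb]
        have hk1 : k + 1 < K := by omega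
        rw [ih (n * K + k) (k + 1) (by omega) hk1]
        have hmin : min (k + ((c+1:Nat):Int)) K = min ((k+1) + (c:Int)) K := by
          push_cast; omega
        rw [hmin]
        have hlt : k < min ((k+1) + (c:Int)) K := by omega
        rw [PySem.List.pyRange_one_cons hlt]
        simp

lemma inner_k_nonpos (K : Int) (hK : K ≤ 0) :
    ∀ (c : Nat) (n k : Int), 0 ≤ k → (innerA K c n k).2 = k + c := by
  intro c
  induction c with
  | zero => intro n k hk; simp [innerA]
  | succ c ih =>
      intro n k hk
      simp only [innerA]
      rw [if_neg (by omega)]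
      rw [ih (n * K + k) (k + 1) (by omega)]
      push_cast; ring

lemma outer_C_nonpos (K C : Int) (hC : C ≤ 0) :
    ∀ (s : Nat) (k : Int) (ans : List Int), k ≠ K → outerA K C s k ans = [] := by
  intro s
  induction s with
  | zero => intro k ans _; rfl
  | succ s ih =>
      intro k ans hk
      have hct : C.toNat = 0 := by omega
      simp only [outerA, hct, innerA]
      rw [if_neg hk]
      exact ih k _ hk

lemma outer_K_nonpos (K C : Int) (hK : K ≤ 0) (hC : 1 ≤ C) :
    ∀ (s : Nat) (k : Int) (ans : List Int), 0 ≤ k → outerA K C s k ans = [] := by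
  intro s
  induction s with
  | zero => intro k ans _; rfl
  | succ s ih =>
      intro k ans hk
      simp only [outerA]
      have h2 : (innerA K C.toNat 0 k).2 = k + C.toNat := inner_k_nonpos K hK C.toNat 0 k hk
      rw [if_neg (by rw [h2]; omega)]
      rw [h2]
      exact ih _ _ (by omega)

lemma grp_bracket (K C : Int) (hC : 1 ≤ C) :
    (grp K C - 1) * C < K ∧ K ≤ grp K C * C := by
  exact (PySem.Int.neg_floordiv_neg_eq_iff_of_pos (by omega)).mp rfl

lemma grp_one_of_K1 (C : Int) (hC : 1 ≤ C) : grp 1 C = 1 := by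
  obtain ⟨h1, h2⟩ := grp_bracket 1 C hC
  nlinarith [sq_nonneg (grp 1 C - 1)]

lemma full_chunk (K C : Int) (hK : 1 ≤ K) (hC : 1 ≤ C) (i : Int)
    (hi : 0 ≤ i) (hilt : i < grp K C - 1) :
    groupVal K C i = valB K (i * C) C + 1 := by
  obtain ⟨hbr1, _⟩ := grp_bracket K C hC
  have hK2 : 2 ≤ K := by
    by_contra h
    have hK1 : K = 1 := by omega
    rw [hK1, grp_one_of_K1 C hC] at hilt
    omega
  have hfull : (i + 1) * C ≤ (grp K C - 1) * C := by nlinarith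
  have hmin : min ((i + 1) * C) K = (i + 1) * C := by omega
  have hend : (i + 1) * C = i * C + ((C.toNat : Nat) : Int) := by
    have : ((C.toNat : Nat) : Int) = C := by omega
    rw [this]; ring
  unfold groupVal
  rw [hmin, hend, fold_closed K C.toNat (i * C)]
  have hCc : C = ((C.toNat : Nat) : Int) := by omega
  rw [show valB K (i * C) C = valB K (i * C) ((C.toNat : Nat) : Int) by rw [← hCc]]
  rw [valB_eq K hK2 (i * C) C.toNat]

lemma last_chunk (K C : Int) (hK : 1 ≤ K) (hC : 1 ≤ C) :
    groupVal K C (grp K C - 1)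
      = valB K ((grp K C - 1) * C) (K - (grp K C - 1) * C) + 1 := by
  obtain ⟨hbr1, hbr2⟩ := grp_bracket K C hC
  set a := (grp K C - 1) * C with ha
  have hmin : min ((grp K C - 1 + 1) * C) K = K := by
    have : (grp K C - 1 + 1) * C = grp K C * C := by ring
    omega
  have hLpos : 1 ≤ K - a := by omega
  have hLc : ((K - a).toNat : Int) = K - a := by omega
  have hend : K = a + (((K - a).toNat : Nat) : Int) := by omega
  unfold groupVal
  rw [hmin]
  rw [show PySem.List.pyRange a K 1 = PySem.List.pyRange a (a + (((K - a).toNat : Nat) : Int)) 1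
        by rw [← hend]]
  rw [fold_closed K (K - a).toNat a]
  by_cases hK1 : K = 1
  · have hg1 : grp K C = 1 := by rw [hK1]; exact grp_one_of_K1 C hC
    have ha0 : a = 0 := by rw [ha, hg1]; ring
    have hL1 : (K - a).toNat = 1 := by omega
    rw [ha0, hK1]
    decide
  · have hK2 : 2 ≤ K := by omega
    rw [show valB K a (K - a) = valB K a (((K - a).toNat : Nat) : Int) by rw [hLc]]
    rw [valB_eq K hK2 a (K - a).toNat]

lemma outer_main (K C : Int) (hK : 1 ≤ K) (hC : 1 ≤ C) :
    ∀ (s : Nat) (i : Int) (ans : List Int), 0 ≤ i → i * C < K →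
      outerA K C s (i * C) ans =
        if (s : Int) < grp K C - i then []
        else ans ++ (PySem.List.pyRange i (grp K C) 1).map (groupVal K C) := by
  obtain ⟨hbr1, hbr2⟩ := grp_bracket K C hC
  intro s
  induction s with
  | zero =>
      intro i ans hi hiK
      have hig : i < grp K C := by nlinarith
      rw [if_pos (by push_cast; omega)]
      rfl
  | succ s ih =>
      intro i ans hi hiK
      have hig : i < grp K C := by nlinarith
      simp only [outerA]
      have hct : (C.toNat : Int) = C := by omega
      have hin := inner_spec K hK C.toNat 0 (i * C) (by positivity) hiK
      have hend : i * C + (C.toNat : Int) = (i + 1) * C := by rw [hct]; ring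
      rw [hend] at hin
      rw [hin]
      by_cases hfull : K ≤ (i + 1) * C
      · have h2 : min ((i + 1) * C) K = K := by omega
        rw [h2, if_pos rfl]
        have hgeq : grp K C = i + 1 := by nlinarith
        rw [if_neg (by push_cast; omega)]
        rw [hgeq, PySem.List.pyRange_one_cons (by omega : i < i + 1),
            pyRange_one_nil (i+1) (i+1) le_rfl]
        simp [groupVal, h2]
      · have h2 : min ((i + 1) * C) K = (i + 1) * C := by omega
        rw [h2]
        rw [if_neg (by omega)]
        rw [ih (i + 1) _ (by omega) (by omega)]
        rw [PySem.List.pyRange_one_cons hig]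
        by_cases hs : (s : Int) < grp K C - (i + 1)
        · rw [if_pos hs, if_pos (by push_cast; omega)]
        · rw [if_neg hs, if_neg (by push_cast; omega)]
          simp [groupVal, h2]

-- ===== VERDICT (by name: the statement is the Claim_ definition above) =====
theorem solve_spec : Claim_unchanged_solve := by
  intro K C S _ hnD
  by_cases hK : K ≤ 0
  · by_cases hC : C ≤ 0
    · unfold solve solve_alt
      rw [if_pos (Or.inl hK)]
      by_cases hS : S ≤ 0
      · have : S.toNat = 0 := by omega
        rw [this]; rfl
      · unfold D_solve at hnD
        have hKne : K ≠ 0 := by omega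
        exact outer_C_nonpos K C hC S.toNat 0 [] (by omega)
    · unfold solve solve_alt
      rw [if_pos (Or.inl hK)]
      exact outer_K_nonpos K C hK (by omega) S.toNat 0 [] le_rfl
  · by_cases hC : C ≤ 0
    · unfold solve solve_alt
      rw [if_pos (Or.inr hC)]
      exact outer_C_nonpos K C hC S.toNat 0 [] (by omega)
    · -- main case K ≥ 1, C ≥ 1
      have hK1 : 1 ≤ K := by omega
      have hC1 : 1 ≤ C := by omega
      obtain ⟨hbr1, hbr2⟩ := grp_bracket K C hC1
      have hg1 : 1 ≤ grp K C := by nlinarith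
      have hA := outer_main K C hK1 hC1 S.toNat 0 [] le_rfl (by omega)
      rw [zero_mul] at hA
      have hB : solve_alt K C S =
          if S < grp K C then []
          else ((PySem.List.pyRange 0 (grp K C - 1) 1).map (fun i => valB K (i * C) C + 1))
            ++ [valB K ((grp K C - 1) * C) (K - (grp K C - 1) * C) + 1] := by
        unfold solve_alt
        rw [if_neg (by omega)]
        rfl
      unfold solve
      rw [hA, hB]
      by_cases hS : S < grp K C
      · rw [if_pos (by omega), if_pos hS]
      · rw [if_neg (by omega), if_neg hS]
        rw [PySem.List.pyRange_one_append 0 (grp K C - 1) (grp K C) (by omega) (by omega)]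
        have hsing : PySem.List.pyRange (grp K C - 1) (grp K C) 1 = [grp K C - 1] := by
          rw [PySem.List.pyRange_one_cons (show grp K C - 1 < grp K C by omega),
              pyRange_one_nil (grp K C - 1 + 1) (grp K C) (by omega)]
        rw [hsing, List.map_append, List.map_cons, List.map_nil]
        rw [List.nil_append]
        congr 1
        · apply List.map_congr_left
          intro i hi
          rw [PySem.List.mem_pyRange_one] at hi
          exact full_chunk K C hK1 hC1 i hi.1 (by omega)
        · rw [last_chunk K C hK1 hC1]

theorem solve_changed : Claim_changed_solve := by
  unfold Claim_changed_solve; decide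

theorem solve_tight : Claim_exact_solve := by
  intro K C S _ hD
  obtain ⟨hK, hC, hS⟩ := hD
  have halt : solve_alt K C S = [] := by
    unfold solve_alt; rw [if_pos (Or.inl (by omega))]
  have hsn : S.toNat = (S.toNat - 1) + 1 := by omega
  have hct : C.toNat = 0 := by omega
  have hA : solve K C S = [1] := by
    unfold solve
    rw [hsn]
    simp [outerA, innerA, hct, hK]
  rw [hA, halt]
  simp
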